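-- pv_equiv track=rewrite | github.com/W-Thurston/Advent-of-Code-Lets-Learn | src/aoc2025/solutions/day04/optimized.py | part1
-- ===== SOURCE A (Python) =====
-- D8: list[tuple[int, int]] = [
--     (-1, -1),
--     (-1, 0),
--     (-1, 1),
--     (0, -1),
--     (0, 1),
--     (1, -1),
--     (1, 0),
--     (1, 1),
-- ]
--
-- def compute_initial_counts(grid: list[list[str]]) -> list[list[int]]:
--     """Precompute adjacency counts for all cells."""
--     h: int = len(grid)
--     w: int = len(grid[0])
--     adj: list[list[int]] = [[0] * w for _ in range(h)]
--     for r in range(h):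
--         for c in range(w):
--             if grid[r][c] == "@":
--                 cnt = 0
--                 for dr, dc in D8:
--                     rr, cc = r + dr, c + dc
--                     if 0 <= rr < h and 0 <= cc < w and grid[rr][cc] == "@":
--                         cnt += 1
--                 adj[r][c] = cnt
--     return adj
--
-- def part1(data: list[str]) -> int:
--     grid: list[list[str]] = [list(row.rstrip()) for row in data]
--     adj: list[list[int]] = compute_initial_counts(grid)
--
--     adjacent_roll_threshold: int = 4
--
--     total = 0
--     h: int = len(grid)
--     w: int = len(grid[0])
--     for r in range(h):
--         for c in range(w):
--             if grid[r][c] == "@" and adj[r][c] < adjacent_roll_threshold: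
--                 total += 1
--     return total
-- ===== SOURCE B (Python) =====
-- def part1(data: list[str]) -> int:
--     grid = [list(row.rstrip()) for row in data]
--     h = len(grid)
--     w = len(grid[0])
--     # separable 3x3 box filter: pass 1 builds vertical triple sums of the
--     # '@' indicator; pass 2 slides a width-3 window over them and subtracts
--     # the cell itself instead of enumerating the 8 neighbor offsets.
--     vs = [[(r > 0 and grid[r - 1][c] == "@")
--            + (grid[r][c] == "@")
--            + (r + 1 < h and grid[r + 1][c] == "@")
--            for c in range(w)]
--           for r in range(h)]
--     total = 0
--     for r in range(h):
--         row = vs[r]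
--         for c in range(w):
--             if grid[r][c] == "@":
--                 box = (row[c - 1] if c > 0 else 0) + row[c] + (row[c + 1] if c + 1 < w else 0)
--                 if box - 1 < 4:
--                     total += 1
--     return total
-- ===== Notes on version B (the rewrite author's own statement) =====
-- stated objective: alternative
-- what changed: B never enumerates the 8 neighbor offsets (D8 is gone): it computes the 3x3 box sum of the '@' indicator as a separable filter - a first pass builds per-cell vertical triple sums, a second pass adds a width-3 horizontal window of those sums and subtracts the cell itself - and counts cells where box-1 < 4.
import Mathlib
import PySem

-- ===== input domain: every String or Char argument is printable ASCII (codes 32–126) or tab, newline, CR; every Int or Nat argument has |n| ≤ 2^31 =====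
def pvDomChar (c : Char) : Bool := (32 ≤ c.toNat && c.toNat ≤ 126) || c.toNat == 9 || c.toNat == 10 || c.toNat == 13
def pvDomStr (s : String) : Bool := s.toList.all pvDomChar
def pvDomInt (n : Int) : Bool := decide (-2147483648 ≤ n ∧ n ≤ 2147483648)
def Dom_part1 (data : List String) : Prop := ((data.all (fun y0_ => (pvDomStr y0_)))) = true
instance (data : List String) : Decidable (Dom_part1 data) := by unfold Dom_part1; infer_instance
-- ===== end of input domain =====

-- B replaces A's per-cell enumeration of the 8 neighbor offsets (the D8 table) by a
-- separable 3x3 box filter: vertical triple sums first, then a width-3 horizontal window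
-- minus the cell itself (objective: alternative algorithm; equal return value proved below).

-- ===== PORT A =====
def D8 : List (Int × Int) :=
  [(-1, -1), (-1, 0), (-1, 1), (0, -1), (0, 1), (1, -1), (1, 0), (1, 1)]

-- grid[r][c] with the defaults never used inside the bounds checks of A (Pre_ excludes ragged rows)
def pvCell (grid : List (List Char)) (r c : Int) : Char :=
  PySem.List.pyGetD (PySem.List.pyGetD grid r []) c ' '

-- the inner 'for dr, dc in D8' counting loop of compute_initial_counts, extracted as a helper
def pvNeigh (grid : List (List Char)) (h w r c : Int) : Int :=
  D8.foldl (fun cnt d =>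
    if 0 ≤ r + d.1 ∧ r + d.1 < h ∧ 0 ≤ c + d.2 ∧ c + d.2 < w ∧
        pvCell grid (r + d.1) (c + d.2) = '@' then cnt + 1 else cnt) 0

def compute_initial_counts (grid : List (List Char)) : List (List Int) :=
  let h : Int := grid.length
  let w : Int := (PySem.List.pyGetD grid 0 []).length
  let adj0 : List (List Int) := List.replicate h.toNat (List.replicate w.toNat 0)
  (PySem.List.pyRange 0 h 1).foldl (fun adj r =>
    (PySem.List.pyRange 0 w 1).foldl (fun adj c =>
      if pvCell grid r c = '@' then
        PySem.List.pySetD adj r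
          (PySem.List.pySetD (PySem.List.pyGetD adj r []) c (pvNeigh grid h w r c))
      else adj) adj) adj0

def part1 (data : List String) : Int :=
  let grid : List (List Char) := data.map (fun row => (PySem.Str.rstrip row).toList)
  let adj : List (List Int) := compute_initial_counts grid
  let threshold : Int := 4
  let h : Int := grid.length
  let w : Int := (PySem.List.pyGetD grid 0 []).length
  (PySem.List.pyRange 0 h 1).foldl (fun total r =>
    (PySem.List.pyRange 0 w 1).foldl (fun total c =>
      if pvCell grid r c = '@' ∧
          PySem.List.pyGetD (PySem.List.pyGetD adj r []) c 0 < threshold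
      then total + 1 else total) total) 0

-- ===== PORT B =====
def part1_alt (data : List String) : Int :=
  let grid : List (List Char) := data.map (fun row => (PySem.Str.rstrip row).toList)
  let h : Int := grid.length
  let w : Int := (PySem.List.pyGetD grid 0 []).length
  -- pass 1: vertical triple sums of the '@' indicator (bool arithmetic ported as 0/1 ites)
  let vs : List (List Int) :=
    (PySem.List.pyRange 0 h 1).map (fun r =>
      (PySem.List.pyRange 0 w 1).map (fun c =>
        (if 0 < r ∧ pvCell grid (r - 1) c = '@' then (1:Int) else 0)
        + (if pvCell grid r c = '@' then (1:Int) else 0)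
        + (if r + 1 < h ∧ pvCell grid (r + 1) c = '@' then (1:Int) else 0)))
  -- pass 2: width-3 horizontal window over vs, minus the cell itself
  (PySem.List.pyRange 0 h 1).foldl (fun total r =>
    let row : List Int := PySem.List.pyGetD vs r []
    (PySem.List.pyRange 0 w 1).foldl (fun total c =>
      if pvCell grid r c = '@' then
        let box : Int := (if 0 < c then PySem.List.pyGetD row (c - 1) 0 else 0)
          + PySem.List.pyGetD row c 0
          + (if c + 1 < w then PySem.List.pyGetD row (c + 1) 0 else 0)
        if box - 1 < 4 then total + 1 else total
      else total) total) 0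

-- ===== PRECONDITION & SPEC =====
-- Pre_ excludes exactly the inputs where the Python A raises IndexError: empty input
-- (len(grid[0])) and grids where some rstripped row is shorter than the first one
-- (grid[r][c] with c < w out of range).
def Pre_part1 (data : List String) : Prop :=
  data ≠ [] ∧ ∀ s ∈ data,
    (PySem.Str.rstrip (data.headD "")).toList.length ≤ (PySem.Str.rstrip s).toList.length
instance (data : List String) : Decidable (Pre_part1 data) := by
  unfold Pre_part1; infer_instance

def pvWitness_part1 : List String := ["@@.", ".@@", "@.@"]

def Spec_part1 (data : List String) (out : Int) : Prop := out = part1_alt data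
instance (data : List String) (out : Int) : Decidable (Spec_part1 data out) := by
  unfold Spec_part1; infer_instance

-- ===== CLAIM (what is proved, stated in full; the proofs are below) =====
def Claim_equal_part1 : Prop :=
  ∀ (data : List String), Dom_part1 data → Pre_part1 data → Spec_part1 data (part1 data)

-- ===== LEMMAS AND PROOFS =====

-- the '@' indicator with A's bounds check, the common currency of both sides
def pvI (grid : List (List Char)) (h w rr cc : Int) : Int :=
  if 0 ≤ rr ∧ rr < h ∧ 0 ≤ cc ∧ cc < w ∧ pvCell grid rr cc = '@' then 1 else 0

-- in-range pySetD/pyGetD facts (Int index)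
lemma pv_get_set_self {α : Type} (xs : List α) (r : Int) (v d : α)
    (h0 : 0 ≤ r) (h1 : r < (xs.length : Int)) :
    PySem.List.pyGetD (PySem.List.pySetD xs r v) r d = v := by
  rw [PySem.List.pySetD_of_nonneg xs v h0,
      PySem.List.pyGetD_eq_getElem _ d h0 (by simpa using h1)]
  exact List.getElem_set_self _

lemma pv_get_set_ne {α : Type} (xs : List α) (r' r : Int) (v d : α)
    (h0' : 0 ≤ r') (h0 : 0 ≤ r) (h1 : r < (xs.length : Int)) (hne : r ≠ r') :
    PySem.List.pyGetD (PySem.List.pySetD xs r' v) r d = PySem.List.pyGetD xs r d := by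
  rw [PySem.List.pySetD_of_nonneg xs v h0',
      PySem.List.pyGetD_eq_getElem _ d h0 (by simpa using h1),
      PySem.List.pyGetD_eq_getElem _ d h0 h1]
  exact List.getElem_set_ne (by omega) _

lemma pv_set_get_self {α : Type} (xs : List α) (r : Int) (d : α)
    (h0 : 0 ≤ r) (h1 : r < (xs.length : Int)) :
    PySem.List.pySetD xs r (PySem.List.pyGetD xs r d) = xs := by
  rw [PySem.List.pyGetD_eq_getElem _ d h0 h1, PySem.List.pySetD_of_nonneg _ _ h0]
  exact List.set_getElem_self (by omega)

lemma pv_set_set {α : Type} (xs : List α) (r : Int) (v v' : α) (h0 : 0 ≤ r) :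
    PySem.List.pySetD (PySem.List.pySetD xs r v) r v' = PySem.List.pySetD xs r v' := by
  rw [PySem.List.pySetD_of_nonneg xs v h0, PySem.List.pySetD_of_nonneg _ v' h0,
      PySem.List.pySetD_of_nonneg xs v' h0]
  exact List.set_set v

-- the inner column loop of compute_initial_counts only rewrites row r of the table
lemma pv_innerLift (cond : Int → Prop) [DecidablePred cond] (f : Int → Int) :
    ∀ (cs : List Int) (adj : List (List Int)) (r : Int), 0 ≤ r → r < (adj.length : Int) →
      cs.foldl (fun a c => if cond c then
          PySem.List.pySetD a r (PySem.List.pySetD (PySem.List.pyGetD a r []) c (f c)) else a) adj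
        = PySem.List.pySetD adj r
            (cs.foldl (fun row c => if cond c then PySem.List.pySetD row c (f c) else row)
              (PySem.List.pyGetD adj r []))
  | [], adj, r, h0, h1 => by
      simpa using (pv_set_get_self adj r [] h0 h1).symm
  | c :: cs, adj, r, h0, h1 => by
      simp only [List.foldl_cons]
      by_cases hc : cond c
      · rw [if_pos hc, if_pos hc,
          pv_innerLift cond f cs _ r h0 (by rw [PySem.List.length_pySetD]; exact h1),
          pv_get_set_self _ _ _ _ h0 h1, pv_set_set _ _ _ _ h0]
      · rw [if_neg hc, if_neg hc]
        exact pv_innerLift cond f cs adj r h0 h1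

-- each row of the table is written by exactly one outer iteration
lemma pv_outerGet (cond : Int → Int → Prop) [inst : ∀ r c, Decidable (cond r c)]
    (f : Int → Int → Int) (cs : List Int) :
    ∀ (rs : List Int), rs.Nodup → ∀ (adj : List (List Int)) (r : Int),
      (∀ r' ∈ rs, 0 ≤ r' ∧ r' < (adj.length : Int)) → 0 ≤ r → r < (adj.length : Int) →
      PySem.List.pyGetD (rs.foldl (fun a r' =>
          cs.foldl (fun a2 c => if cond r' c then
            PySem.List.pySetD a2 r' (PySem.List.pySetD (PySem.List.pyGetD a2 r' []) c (f r' c))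
            else a2) a) adj) r []
        = if r ∈ rs then
            cs.foldl (fun row c => if cond r c then PySem.List.pySetD row c (f r c) else row)
              (PySem.List.pyGetD adj r [])
          else PySem.List.pyGetD adj r []
  | [], _, adj, r, _, _, _ => by simp
  | r' :: rs, hnd, adj, r, hmem, h0, h1 => by
      simp only [List.foldl_cons]
      obtain ⟨hr'0, hr'1⟩ := hmem r' (by simp)
      rw [pv_innerLift (cond r') (f r') cs adj r' hr'0 hr'1]
      rw [pv_outerGet cond f cs rs hnd.of_cons _ r
        (fun x hx => by rw [PySem.List.length_pySetD]; exact hmem x (by simp [hx]))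
        h0 (by rw [PySem.List.length_pySetD]; exact h1)]
      by_cases hr : r ∈ rs
      · have hne : r ≠ r' := fun h => (List.nodup_cons.mp hnd).1 (h ▸ hr)
        rw [if_pos hr, if_pos (by simp [hr]),
          pv_get_set_ne adj r' r _ [] hr'0 h0 h1 hne]
      · rw [if_neg hr]
        by_cases he : r = r'
        · subst he
          rw [pv_get_set_self adj r _ [] h0 h1, if_pos (by simp)]
        · rw [pv_get_set_ne adj r' r _ [] hr'0 h0 h1 he, if_neg (by simp [hr, he])]

-- each entry of a row is written at most once, with a value not depending on the row
lemma pv_rowGet (cond : Int → Prop) [DecidablePred cond] (f : Int → Int) :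
    ∀ (cs : List Int) (row : List Int) (c : Int),
      (∀ c' ∈ cs, 0 ≤ c' ∧ c' < (row.length : Int)) → 0 ≤ c → c < (row.length : Int) →
      PySem.List.pyGetD
        (cs.foldl (fun row' c' => if cond c' then PySem.List.pySetD row' c' (f c') else row') row) c 0
        = if c ∈ cs ∧ cond c then f c else PySem.List.pyGetD row c 0
  | [], row, c, _, _, _ => by simp
  | c' :: cs, row, c, hmem, h0, h1 => by
      simp only [List.foldl_cons]
      obtain ⟨hc'0, hc'1⟩ := hmem c' (by simp)
      have hstep : ∀ x, x ∈ cs → 0 ≤ x ∧ x <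
          (((if cond c' then PySem.List.pySetD row c' (f c') else row).length : Nat) : Int) := by
        intro x hx
        by_cases hcc : cond c'
        · rw [if_pos hcc, PySem.List.length_pySetD]; exact hmem x (by simp [hx])
        · rw [if_neg hcc]; exact hmem x (by simp [hx])
      have hlen : (((if cond c' then PySem.List.pySetD row c' (f c') else row).length : Nat) : Int)
          = (row.length : Int) := by
        by_cases hcc : cond c'
        · rw [if_pos hcc, PySem.List.length_pySetD]
        · rw [if_neg hcc]
      rw [pv_rowGet cond f cs _ c hstep h0 (by rw [hlen]; exact h1)]
      by_cases hmemc : c ∈ cs ∧ cond c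
      · rw [if_pos hmemc, if_pos ⟨by simp [hmemc.1], hmemc.2⟩]
      · rw [if_neg hmemc]
        by_cases he : c = c'
        · subst he
          by_cases hcc : cond c
          · rw [if_pos hcc, if_pos ⟨by simp, hcc⟩, pv_get_set_self _ _ _ _ h0 h1]
          · rw [if_neg hcc, if_neg (by simp [hcc])]
        · have hiff : (c ∈ c' :: cs ∧ cond c) ↔ (c ∈ cs ∧ cond c) := by
            constructor
            · rintro ⟨hm, hc⟩
              rcases List.mem_cons.mp hm with h | h
              · exact absurd h he
              · exact ⟨h, hc⟩
            · rintro ⟨hm, hc⟩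
              exact ⟨List.mem_cons.mpr (Or.inr hm), hc⟩
          rw [if_neg (fun h => hmemc (hiff.mp h))]
          by_cases hcc : cond c'
          · rw [if_pos hcc, pv_get_set_ne _ _ _ _ _ hc'0 h0 h1 he]
          · rw [if_neg hcc]

-- characterization of the adjacency table built by A
lemma pv_adj_entry (grid : List (List Char)) (r c : Int)
    (hr0 : 0 ≤ r) (hr1 : r < (grid.length : Int))
    (hc0 : 0 ≤ c) (hc1 : c < ((PySem.List.pyGetD grid 0 []).length : Int)) :
    PySem.List.pyGetD (PySem.List.pyGetD (compute_initial_counts grid) r []) c 0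
      = if pvCell grid r c = '@' then
          pvNeigh grid (grid.length : Int) ((PySem.List.pyGetD grid 0 []).length : Int) r c
        else 0 := by
  have hlen0 : ((List.replicate ((grid.length : Int)).toNat
      (List.replicate (((PySem.List.pyGetD grid 0 []).length : Int)).toNat (0:Int))).length : Int)
      = (grid.length : Int) := by
    simp
  simp only [compute_initial_counts]
  rw [pv_outerGet (fun r' c' => pvCell grid r' c' = '@')
      (fun r' c' => pvNeigh grid (grid.length : Int) ((PySem.List.pyGetD grid 0 []).length : Int) r' c')
      (PySem.List.pyRange 0 ((PySem.List.pyGetD grid 0 []).length : Int))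
      (PySem.List.pyRange 0 (grid.length : Int)) (PySem.List.nodup_pyRange_one _ _)
      _ r
      (fun x hx => by
        rw [hlen0]
        exact ⟨(PySem.List.mem_pyRange_one.mp hx).1, (PySem.List.mem_pyRange_one.mp hx).2⟩)
      hr0 (by rw [hlen0]; exact hr1)]
  rw [if_pos (PySem.List.mem_pyRange_one.mpr ⟨hr0, hr1⟩)]
  have hrow : PySem.List.pyGetD (List.replicate ((grid.length : Int)).toNat
      (List.replicate (((PySem.List.pyGetD grid 0 []).length : Int)).toNat (0:Int))) r []
      = List.replicate (((PySem.List.pyGetD grid 0 []).length : Int)).toNat (0:Int) := by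
    rw [PySem.List.pyGetD_eq_getElem _ _ hr0 (by rw [hlen0]; exact hr1)]
    exact List.getElem_replicate _
  rw [hrow]
  have hrlen : (((List.replicate (((PySem.List.pyGetD grid 0 []).length : Int)).toNat (0:Int)).length : Nat) : Int)
      = ((PySem.List.pyGetD grid 0 []).length : Int) := by
    simp
  rw [pv_rowGet (fun c' => pvCell grid r c' = '@')
      (fun c' => pvNeigh grid (grid.length : Int) ((PySem.List.pyGetD grid 0 []).length : Int) r c')
      (PySem.List.pyRange 0 ((PySem.List.pyGetD grid 0 []).length : Int))
      _ c
      (fun x hx => by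
        rw [hrlen]
        exact ⟨(PySem.List.mem_pyRange_one.mp hx).1, (PySem.List.mem_pyRange_one.mp hx).2⟩)
      hc0 (by rw [hrlen]; exact hc1)]
  have hz : PySem.List.pyGetD
      (List.replicate (((PySem.List.pyGetD grid 0 []).length : Int)).toNat (0:Int)) c 0 = 0 := by
    rw [PySem.List.pyGetD_eq_getElem _ _ hc0 (by rw [hrlen]; exact hc1)]
    exact List.getElem_replicate _
  rw [hz]
  have hmem : c ∈ PySem.List.pyRange 0 ((PySem.List.pyGetD grid 0 []).length : Int) :=
    PySem.List.mem_pyRange_one.mpr ⟨hc0, hc1⟩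
  by_cases hcell : pvCell grid r c = '@'
  · rw [if_pos ⟨hmem, hcell⟩, if_pos hcell]
  · rw [if_neg (fun h => hcell h.2), if_neg hcell]

-- A's neighbour count expanded into the 8 bounds-checked indicators
lemma pv_neigh_expand (grid : List (List Char)) (h w r c : Int) :
    pvNeigh grid h w r c
      = pvI grid h w (r + -1) (c + -1) + pvI grid h w (r + -1) (c + 0)
        + pvI grid h w (r + -1) (c + 1) + pvI grid h w (r + 0) (c + -1)
        + pvI grid h w (r + 0) (c + 1) + pvI grid h w (r + 1) (c + -1)
        + pvI grid h w (r + 1) (c + 0) + pvI grid h w (r + 1) (c + 1) := by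
  unfold pvNeigh
  rw [PySem.List.foldl_ite_add_one]
  simp only [D8, List.countP_cons, List.countP_nil, decide_eq_true_eq]
  unfold pvI
  push_cast
  ring

-- a vertical triple sum entry equals three indicators (the row/column being in range)
lemma pv_vs_entry (grid : List (List Char)) (h w r cc : Int)
    (hh : h = (grid.length : Int)) (hr0 : 0 ≤ r) (hr1 : r < h) (hc0 : 0 ≤ cc) (hc1 : cc < w) :
    (if 0 < r ∧ pvCell grid (r - 1) cc = '@' then (1:Int) else 0)
      + (if pvCell grid r cc = '@' then (1:Int) else 0)
      + (if r + 1 < h ∧ pvCell grid (r + 1) cc = '@' then (1:Int) else 0)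
    = pvI grid h w (r - 1) cc + pvI grid h w r cc + pvI grid h w (r + 1) cc := by
  unfold pvI
  have e1 : (0 ≤ r - 1 ∧ r - 1 < h ∧ 0 ≤ cc ∧ cc < w ∧ pvCell grid (r - 1) cc = '@')
      ↔ (0 < r ∧ pvCell grid (r - 1) cc = '@') := by
    constructor
    · rintro ⟨a, _, _, _, e⟩; exact ⟨by omega, e⟩
    · rintro ⟨a, e⟩; exact ⟨by omega, by omega, hc0, hc1, e⟩
  have e2 : (0 ≤ r ∧ r < h ∧ 0 ≤ cc ∧ cc < w ∧ pvCell grid r cc = '@')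
      ↔ (pvCell grid r cc = '@') := by
    constructor
    · rintro ⟨_, _, _, _, e⟩; exact e
    · intro e; exact ⟨hr0, hr1, hc0, hc1, e⟩
  have e3 : (0 ≤ r + 1 ∧ r + 1 < h ∧ 0 ≤ cc ∧ cc < w ∧ pvCell grid (r + 1) cc = '@')
      ↔ (r + 1 < h ∧ pvCell grid (r + 1) cc = '@') := by
    constructor
    · rintro ⟨_, b, _, _, e⟩; exact ⟨b, e⟩
    · rintro ⟨b, e⟩; exact ⟨by omega, b, hc0, hc1, e⟩
  rw [if_congr e1 rfl rfl, if_congr e2 rfl rfl, if_congr e3 rfl rfl]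

-- an out-of-range column contributes nothing
lemma pv_pvI_col_oob (grid : List (List Char)) (h w rr cc : Int)
    (hcc : cc < 0 ∨ w ≤ cc) : pvI grid h w rr cc = 0 := by
  unfold pvI
  rw [if_neg]
  rintro ⟨_, _, a, b, _⟩; omega

-- the per-cell agreement: A's branch equals B's branch for every in-range (r, c)
lemma pv_cell_eq (grid : List (List Char)) (h w r c : Int) (total : Int)
    (hh : h = (grid.length : Int)) (hw : w = ((PySem.List.pyGetD grid 0 []).length : Int))
    (hr0 : 0 ≤ r) (hr1 : r < h) (hc0 : 0 ≤ c) (hc1 : c < w) :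
    (if pvCell grid r c = '@' ∧
        PySem.List.pyGetD (PySem.List.pyGetD (compute_initial_counts grid) r []) c 0 < 4
      then total + 1 else total)
    = (if pvCell grid r c = '@' then
        if ((if 0 < c then PySem.List.pyGetD
              (PySem.List.pyGetD ((PySem.List.pyRange 0 h 1).map (fun r' =>
                (PySem.List.pyRange 0 w 1).map (fun c' =>
                  (if 0 < r' ∧ pvCell grid (r' - 1) c' = '@' then (1:Int) else 0)
                  + (if pvCell grid r' c' = '@' then (1:Int) else 0)
                  + (if r' + 1 < h ∧ pvCell grid (r' + 1) c' = '@' then (1:Int) else 0)))) r [])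
              (c - 1) 0 else 0)
            + PySem.List.pyGetD
              (PySem.List.pyGetD ((PySem.List.pyRange 0 h 1).map (fun r' =>
                (PySem.List.pyRange 0 w 1).map (fun c' =>
                  (if 0 < r' ∧ pvCell grid (r' - 1) c' = '@' then (1:Int) else 0)
                  + (if pvCell grid r' c' = '@' then (1:Int) else 0)
                  + (if r' + 1 < h ∧ pvCell grid (r' + 1) c' = '@' then (1:Int) else 0)))) r [])
              c 0
            + (if c + 1 < w then PySem.List.pyGetD
              (PySem.List.pyGetD ((PySem.List.pyRange 0 h 1).map (fun r' =>
                (PySem.List.pyRange 0 w 1).map (fun c' =>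
                  (if 0 < r' ∧ pvCell grid (r' - 1) c' = '@' then (1:Int) else 0)
                  + (if pvCell grid r' c' = '@' then (1:Int) else 0)
                  + (if r' + 1 < h ∧ pvCell grid (r' + 1) c' = '@' then (1:Int) else 0)))) r [])
              (c + 1) 0 else 0)) - 1 < 4
        then total + 1 else total
      else total) := by
  -- resolve the row of vs
  rw [PySem.List.pyGetD_map_pyRange_of_nonneg _ h r [] hr0 hr1]
  -- the three horizontal lookups
  have hlook : ∀ cc : Int, 0 ≤ cc → cc < w →
      PySem.List.pyGetD ((PySem.List.pyRange 0 w 1).map (fun c' =>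
          (if 0 < r ∧ pvCell grid (r - 1) c' = '@' then (1:Int) else 0)
          + (if pvCell grid r c' = '@' then (1:Int) else 0)
          + (if r + 1 < h ∧ pvCell grid (r + 1) c' = '@' then (1:Int) else 0))) cc 0
        = pvI grid h w (r - 1) cc + pvI grid h w r cc + pvI grid h w (r + 1) cc := by
    intro cc h0 h1
    rw [PySem.List.pyGetD_map_pyRange_of_nonneg _ w cc 0 h0 h1]
    exact pv_vs_entry grid h w r cc hh hr0 hr1 h0 h1
  by_cases hcell : pvCell grid r c = '@'
  · have hadj := pv_adj_entry grid r c hr0 (hh ▸ hr1) hc0 (hw ▸ hc1)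
    rw [if_pos hcell, ← hh, ← hw] at hadj
    rw [if_pos hcell]
    have hbox : (if 0 < c then PySem.List.pyGetD ((PySem.List.pyRange 0 w 1).map (fun c' =>
          (if 0 < r ∧ pvCell grid (r - 1) c' = '@' then (1:Int) else 0)
          + (if pvCell grid r c' = '@' then (1:Int) else 0)
          + (if r + 1 < h ∧ pvCell grid (r + 1) c' = '@' then (1:Int) else 0))) (c - 1) 0 else 0)
        + PySem.List.pyGetD ((PySem.List.pyRange 0 w 1).map (fun c' =>
          (if 0 < r ∧ pvCell grid (r - 1) c' = '@' then (1:Int) else 0)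
          + (if pvCell grid r c' = '@' then (1:Int) else 0)
          + (if r + 1 < h ∧ pvCell grid (r + 1) c' = '@' then (1:Int) else 0))) c 0
        + (if c + 1 < w then PySem.List.pyGetD ((PySem.List.pyRange 0 w 1).map (fun c' =>
          (if 0 < r ∧ pvCell grid (r - 1) c' = '@' then (1:Int) else 0)
          + (if pvCell grid r c' = '@' then (1:Int) else 0)
          + (if r + 1 < h ∧ pvCell grid (r + 1) c' = '@' then (1:Int) else 0))) (c + 1) 0 else 0)
        = pvNeigh grid h w r c + 1 := by
      have hself : pvI grid h w r c = 1 := by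
        unfold pvI; rw [if_pos ⟨hr0, hh ▸ hr1, hc0, hc1, hcell⟩]
      have hmid := hlook c hc0 hc1
      have hL : (if 0 < c then PySem.List.pyGetD ((PySem.List.pyRange 0 w 1).map (fun c' =>
          (if 0 < r ∧ pvCell grid (r - 1) c' = '@' then (1:Int) else 0)
          + (if pvCell grid r c' = '@' then (1:Int) else 0)
          + (if r + 1 < h ∧ pvCell grid (r + 1) c' = '@' then (1:Int) else 0))) (c - 1) 0 else 0)
          = pvI grid h w (r - 1) (c - 1) + pvI grid h w r (c - 1) + pvI grid h w (r + 1) (c - 1) := by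
        by_cases hc : 0 < c
        · rw [if_pos hc, hlook (c - 1) (by omega) (by omega)]
        · rw [if_neg hc, pv_pvI_col_oob grid h w (r - 1) (c - 1) (by omega),
            pv_pvI_col_oob grid h w r (c - 1) (by omega),
            pv_pvI_col_oob grid h w (r + 1) (c - 1) (by omega)]
          ring
      have hR : (if c + 1 < w then PySem.List.pyGetD ((PySem.List.pyRange 0 w 1).map (fun c' =>
          (if 0 < r ∧ pvCell grid (r - 1) c' = '@' then (1:Int) else 0)
          + (if pvCell grid r c' = '@' then (1:Int) else 0)
          + (if r + 1 < h ∧ pvCell grid (r + 1) c' = '@' then (1:Int) else 0))) (c + 1) 0 else 0)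
          = pvI grid h w (r - 1) (c + 1) + pvI grid h w r (c + 1) + pvI grid h w (r + 1) (c + 1) := by
        by_cases hc : c + 1 < w
        · rw [if_pos hc, hlook (c + 1) (by omega) hc]
        · rw [if_neg hc, pv_pvI_col_oob grid h w (r - 1) (c + 1) (by omega),
            pv_pvI_col_oob grid h w r (c + 1) (by omega),
            pv_pvI_col_oob grid h w (r + 1) (c + 1) (by omega)]
          ring
      rw [hL, hmid, hR, pv_neigh_expand grid h w r c, hself]
      have a1 : r + -1 = r - 1 := by ring
      have a2 : c + -1 = c - 1 := by ring
      have a3 : r + 0 = r := by ring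
      have a4 : c + 0 = c := by ring
      rw [a1, a2, a3, a4]
      ring
    rw [hadj, hbox]
    have hcond : pvNeigh grid h w r c + 1 - 1 = pvNeigh grid h w r c := by ring
    rw [hcond]
    by_cases hlt : pvNeigh grid h w r c < 4
    · rw [if_pos ⟨hcell, hlt⟩, if_pos hlt]
    · rw [if_neg (fun hx => hlt hx.2), if_neg hlt]
  · rw [if_neg (fun hx => hcell hx.1), if_neg hcell]

theorem part1_spec_aux (data : List String) (_hpre : Pre_part1 data) :
    part1 data = part1_alt data := by
  simp only [part1, part1_alt]
  apply PySem.List.foldl_congr_mem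
  intro total r hr
  obtain ⟨hr0, hr1⟩ := PySem.List.mem_pyRange_one.mp hr
  apply PySem.List.foldl_congr_mem
  intro t c hc
  obtain ⟨hc0, hc1⟩ := PySem.List.mem_pyRange_one.mp hc
  exact pv_cell_eq _ _ _ r c t rfl rfl hr0 hr1 hc0 hc1

-- ===== VERDICT (by name: the statement is the Claim_ definition above) =====
theorem part1_spec : Claim_equal_part1 := by
  intro data _ hpre
  unfold Spec_part1
  exact part1_spec_aux data hpre
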